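-- pv_equiv track=rewrite | github.com/sampsyo/alwayswriting | wordlistgen.py | wordset
-- ===== SOURCE A (Python) =====
-- SUFFICES = ('s', 'es', 'ed', 'd', 'ize', 'izes', 'ized', 'izer', 'izing',
--             'er', 'est', 'ing', 'ation', 'ization', 'ly', 'ally')
--
-- def wordset(words):
--     good = set(words)
--     bad = set()
--     for word in good:
--         # Poor man's stemming.
--         forbidden = False
--         for suffix in SUFFICES:
--             if word.endswith(suffix):
--                 if word[:-len(suffix)] in good or \
--                    word[:-len(suffix)] + 'e' in good or \
--                    word[:-len(suffix)].endswith('i') and \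
--                         word[:-len(suffix)-1] +  'y' in good:
--                     bad.add(word)
--     return good - bad
-- ===== SOURCE B (Python) =====
-- SUFFICES = ('s', 'es', 'ed', 'd', 'ize', 'izes', 'ized', 'izer', 'izing',
--             'er', 'est', 'ing', 'ation', 'ization', 'ly', 'ally')
--
-- def wordset(words):
--     # Generate inflected forms FORWARD from each base word instead of
--     # stripping suffixes backward from each word.
--     good = set(words)
--     bad = set()
--     for b in good:
--         stem = b[:-1]
--         for suf in SUFFICES:
--             cands = [b + suf]
--             if b.endswith('e'):
--                 cands.append(stem + suf)
--             if b.endswith('y'):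
--                 cands.append(stem + 'i' + suf)
--             for c in cands:
--                 if c in good:
--                     bad.add(c)
--     return good - bad
-- ===== Notes on version B (the rewrite author's own statement) =====
-- stated objective: alternative
-- what changed: Instead of stripping each of the 16 suffixes backward off every word and probing the set for its possible stems, B generates the inflected forms forward from each base word (base+suffix, and the e-elision / y-to-i variants) and marks the generated forms that actually occur; same set-difference result.
import Mathlib
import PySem

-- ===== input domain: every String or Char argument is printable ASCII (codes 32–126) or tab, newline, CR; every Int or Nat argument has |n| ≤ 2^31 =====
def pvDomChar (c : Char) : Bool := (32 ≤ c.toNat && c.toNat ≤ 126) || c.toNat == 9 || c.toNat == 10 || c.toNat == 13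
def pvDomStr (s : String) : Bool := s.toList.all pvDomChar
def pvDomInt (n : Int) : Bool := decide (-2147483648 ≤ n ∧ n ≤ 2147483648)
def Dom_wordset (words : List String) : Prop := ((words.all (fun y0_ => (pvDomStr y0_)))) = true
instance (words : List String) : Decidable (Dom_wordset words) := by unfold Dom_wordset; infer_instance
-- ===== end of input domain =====

-- ===== PORT A =====
-- B generates inflected forms forward from each base word instead of stripping
-- suffixes backward from each word (alternative decomposition; same result set).
def SUFFICES : List String :=
  ["s", "es", "ed", "d", "ize", "izes", "ized", "izer", "izing",
   "er", "est", "ing", "ation", "ization", "ly", "ally"]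

def wordset (words : List String) : List String :=
  let good : PySem.Set String := PySem.Set.ofList words
  -- (A's local variable 'forbidden' is assigned but never read; it is omitted.)
  let bad : PySem.Set String :=
    good.foldl (fun bad word =>
      SUFFICES.foldl (fun bad suffix =>
        if PySem.Str.endswith word suffix then
          if PySem.Set.contains good (PySem.Str.slice word none (some (-(PySem.Str.len suffix)))) ||
             PySem.Set.contains good (PySem.Str.slice word none (some (-(PySem.Str.len suffix))) ++ "e") ||
             (PySem.Str.endswith (PySem.Str.slice word none (some (-(PySem.Str.len suffix)))) "i" &&
              PySem.Set.contains good (PySem.Str.slice word none (some (-(PySem.Str.len suffix) - 1)) ++ "y"))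
          then PySem.Set.add bad word
          else bad
        else bad) bad) PySem.Set.empty
  PySem.Set.diff good bad

-- ===== PORT B =====
-- candidate inflected forms generated from base word b with suffix suf (Source B's 'cands' list)
def candsOf (b suf : String) : List String :=
  let stem := PySem.Str.slice b none (some (-1))
  let cands := [b ++ suf]
  let cands := if PySem.Str.endswith b "e" then cands ++ [stem ++ suf] else cands
  if PySem.Str.endswith b "y" then cands ++ [stem ++ "i" ++ suf] else cands

def wordset_alt (words : List String) : List String :=
  let good : PySem.Set String := PySem.Set.ofList words
  let bad : PySem.Set String :=
    good.foldl (fun bad b =>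
      SUFFICES.foldl (fun bad suf =>
        (candsOf b suf).foldl (fun bad c =>
          if PySem.Set.contains good c then PySem.Set.add bad c else bad) bad) bad) PySem.Set.empty
  PySem.Set.diff good bad

-- ===== PRECONDITION & SPEC =====
def Spec_wordset (words : List String) (out : List String) : Prop := out = wordset_alt words
instance (words : List String) (out : List String) : Decidable (Spec_wordset words out) := by unfold Spec_wordset; infer_instance

-- ===== CLAIM (what is proved, stated in full; the proofs are below) =====
def Claim_equal_wordset : Prop := ∀ (words : List String), Dom_wordset words → Spec_wordset words (wordset words)

-- ===== LEMMAS AND PROOFS =====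

-- membership through a fold that conditionally adds elements to a set
theorem mem_foldl_step {alpha : Type} (step : PySem.Set String → alpha → PySem.Set String)
    (P : String → alpha → Prop)
    (h : ∀ (acc : PySem.Set String) (s : alpha) (x : String), x ∈ step acc s ↔ x ∈ acc ∨ P x s)
    (l : List alpha) (b : PySem.Set String) (x : String) :
    x ∈ l.foldl step b ↔ x ∈ b ∨ ∃ s ∈ l, P x s := by
  induction l generalizing b with
  | nil => simp
  | cons a t ih =>
    simp only [List.foldl_cons, ih, h, List.mem_cons]
    constructor
    · rintro ((hb | hp) | ⟨s, hs, hps⟩)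
      · exact Or.inl hb
      · exact Or.inr ⟨a, Or.inl rfl, hp⟩
      · exact Or.inr ⟨s, Or.inr hs, hps⟩
    · rintro (hb | ⟨s, (rfl | hs), hps⟩)
      · exact Or.inl (Or.inl hb)
      · exact Or.inl (Or.inr hps)
      · exact Or.inr ⟨s, hs, hps⟩

theorem mem_if_add (cond : Bool) (acc : PySem.Set String) (w x : String) :
    x ∈ (if cond then PySem.Set.add acc w else acc) ↔ x ∈ acc ∨ (x = w ∧ cond = true) := by
  cases cond <;> simp [PySem.Set.mem_add]

theorem mem_if_if_add (p q : Bool) (acc : PySem.Set String) (w x : String) :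
    x ∈ (if p then (if q then PySem.Set.add acc w else acc) else acc) ↔
      x ∈ acc ∨ (x = w ∧ (p && q) = true) := by
  cases p <;> cases q <;> simp [PySem.Set.mem_add]

-- A's guard for a word and suffix (the two nested if-conditions, conjoined)
def guardA (g : PySem.Set String) (w s : String) : Bool :=
  PySem.Str.endswith w s &&
    (PySem.Set.contains g (PySem.Str.slice w none (some (-(PySem.Str.len s)))) ||
     PySem.Set.contains g (PySem.Str.slice w none (some (-(PySem.Str.len s))) ++ "e") ||
     (PySem.Str.endswith (PySem.Str.slice w none (some (-(PySem.Str.len s)))) "i" &&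
      PySem.Set.contains g (PySem.Str.slice w none (some (-(PySem.Str.len s) - 1)) ++ "y")))

theorem mem_badA (g : PySem.Set String) (b : PySem.Set String) (x : String) :
    x ∈ (g.foldl (fun bad word =>
      SUFFICES.foldl (fun bad suffix =>
        if PySem.Str.endswith word suffix then
          if PySem.Set.contains g (PySem.Str.slice word none (some (-(PySem.Str.len suffix)))) ||
             PySem.Set.contains g (PySem.Str.slice word none (some (-(PySem.Str.len suffix))) ++ "e") ||
             (PySem.Str.endswith (PySem.Str.slice word none (some (-(PySem.Str.len suffix)))) "i" &&
              PySem.Set.contains g (PySem.Str.slice word none (some (-(PySem.Str.len suffix) - 1)) ++ "y"))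
          then PySem.Set.add bad word
          else bad
        else bad) bad) b) ↔
    x ∈ b ∨ (x ∈ g ∧ ∃ s ∈ SUFFICES, guardA g x s = true) := by
  rw [mem_foldl_step _ (fun y w => y = w ∧ ∃ s ∈ SUFFICES, guardA g w s = true)
    (fun acc w y => by
      rw [mem_foldl_step _ (fun z s => z = w ∧ guardA g w s = true)
        (fun acc s z => by rw [mem_if_if_add]; rfl)]
      constructor
      · rintro (ha | ⟨s, hs, rfl, hgs⟩)
        · exact Or.inl ha
        · exact Or.inr ⟨rfl, s, hs, hgs⟩
      · rintro (ha | ⟨rfl, s, hs, hgs⟩)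
        · exact Or.inl ha
        · exact Or.inr ⟨s, hs, rfl, hgs⟩)]
  constructor
  · rintro (hb | ⟨w, hw, rfl, hs⟩)
    · exact Or.inl hb
    · exact Or.inr ⟨hw, hs⟩
  · rintro (hb | ⟨hw, hs⟩)
    · exact Or.inl hb
    · exact Or.inr ⟨x, hw, rfl, hs⟩

theorem mem_badB (g : PySem.Set String) (b : PySem.Set String) (x : String) :
    x ∈ (g.foldl (fun bad w =>
      SUFFICES.foldl (fun bad suf =>
        (candsOf w suf).foldl (fun bad c =>
          if PySem.Set.contains g c then PySem.Set.add bad c else bad) bad) bad) b) ↔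
    x ∈ b ∨ ∃ w ∈ g, ∃ s ∈ SUFFICES, (x ∈ candsOf w s ∧ PySem.Set.contains g x = true) := by
  rw [mem_foldl_step _ (fun y w => ∃ s ∈ SUFFICES, y ∈ candsOf w s ∧ PySem.Set.contains g y = true)
    (fun acc w y => by
      rw [mem_foldl_step _ (fun z s => z ∈ candsOf w s ∧ PySem.Set.contains g z = true)
        (fun acc s z => by
          rw [mem_foldl_step _ (fun u c => u = c ∧ PySem.Set.contains g u = true)
            (fun acc c u => by
              rw [mem_if_add]
              constructor
              · rintro (ha | ⟨rfl, hc⟩)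
                · exact Or.inl ha
                · exact Or.inr ⟨rfl, hc⟩
              · rintro (ha | ⟨rfl, hc⟩)
                · exact Or.inl ha
                · exact Or.inr ⟨rfl, hc⟩)]
          constructor
          · rintro (ha | ⟨c, hc, rfl, hg⟩)
            · exact Or.inl ha
            · exact Or.inr ⟨hc, hg⟩
          · rintro (ha | ⟨hc, hg⟩)
            · exact Or.inl ha
            · exact Or.inr ⟨z, hc, rfl, hg⟩)])]

theorem suffices_ne_nil : ∀ s ∈ SUFFICES, s.toList ≠ [] := by decide

theorem tl_negLen (w s : String) (hs : s.toList ≠ []) :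
    (PySem.Str.slice w none (some (-(PySem.Str.len s)))).toList
      = w.toList.take (w.toList.length - s.toList.length) := by
  rw [PySem.Str.toList_slice, PySem.Chars.slice_eq_listSlice, PySem.Str.len_eq,
    PySem.List.slice_to_neg_natCast _ _ (by cases h : s.toList with
      | nil => exact absurd h hs
      | cons a t => simp)]

theorem tl_negLenSub1 (w s : String) :
    (PySem.Str.slice w none (some (-(PySem.Str.len s) - 1))).toList
      = w.toList.take (w.toList.length - (s.toList.length + 1)) := by
  have h : -(PySem.Str.len s) - 1 = -((s.toList.length + 1 : Nat) : Int) := by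
    rw [PySem.Str.len_eq]; push_cast; ring
  rw [PySem.Str.toList_slice, PySem.Chars.slice_eq_listSlice, h,
    PySem.List.slice_to_neg_natCast _ _ (by omega)]

theorem tl_neg1 (w : String) :
    (PySem.Str.slice w none (some (-1))).toList = w.toList.dropLast := by
  rw [PySem.Str.toList_slice, PySem.Chars.slice_eq_listSlice, PySem.List.slice_to_neg_one]

theorem endsw_iff (a b : String) : PySem.Str.endswith a b = true ↔ b.toList <:+ a.toList := by
  rw [PySem.Str.endswith_eq, PySem.Chars.endswith_iff]

theorem mem_candsOf (w s x : String) :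
    x ∈ candsOf w s ↔ x = w ++ s ∨
      (PySem.Str.endswith w "e" = true ∧ x = PySem.Str.slice w none (some (-1)) ++ s) ∨
      (PySem.Str.endswith w "y" = true ∧ x = PySem.Str.slice w none (some (-1)) ++ "i" ++ s) := by
  unfold candsOf
  cases h1 : PySem.Str.endswith w "e" <;> cases h2 : PySem.Str.endswith w "y" <;>
    simp [h1, h2] <;> tauto

theorem key_iff (g : PySem.Set String) (x s : String) (hx : x ∈ g) (hs : s.toList ≠ []) :
    guardA g x s = true ↔ ∃ w ∈ g, x ∈ candsOf w s := by
  simp only [guardA, Bool.and_eq_true, Bool.or_eq_true, PySem.Set.contains, List.contains_iff_mem]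
  constructor
  · rintro ⟨hes, hcase⟩
    obtain ⟨p, hp⟩ := (endsw_iff x s).mp hes
    have hstem : (PySem.Str.slice x none (some (-(PySem.Str.len s)))).toList = p := by
      rw [tl_negLen x s hs, ← hp]
      have hl : (p ++ s.toList).length - s.toList.length = p.length := by simp
      rw [hl, List.take_left]
    rcases hcase with (hg | hg) | ⟨hi, hg⟩
    · refine ⟨_, hg, ?_⟩
      rw [mem_candsOf]
      left
      apply String.toList_inj.mp
      rw [String.toList_append, hstem, hp]
    · refine ⟨_, hg, ?_⟩
      rw [mem_candsOf]
      right; left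
      constructor
      · rw [endsw_iff, String.toList_append]
        exact List.suffix_append _ _
      · apply String.toList_inj.mp
        rw [String.toList_append, tl_neg1, String.toList_append, hstem,
          show "e".toList = ['e'] from rfl, List.dropLast_concat, hp]
    · obtain ⟨q, hq⟩ := (endsw_iff _ "i").mp hi
      rw [hstem, show "i".toList = ['i'] from rfl] at hq
      have hstem1 : (PySem.Str.slice x none (some (-(PySem.Str.len s) - 1))).toList = q := by
      
        rw [tl_negLenSub1 x s]
        have h1 : p.length + s.toList.length = x.toList.length := by rw [← hp]; simp
        have h2 : q.length + 1 = p.length := by rw [← hq]; simp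
        have hl : x.toList.length - (s.toList.length + 1) = q.length := by omega
        rw [hl, ← hp, ← hq, List.append_assoc, List.take_left]
      refine ⟨_, hg, ?_⟩
      rw [mem_candsOf]
      right; right
      constructor
      · rw [endsw_iff, String.toList_append]
        exact List.suffix_append _ _
      · apply String.toList_inj.mp
        rw [String.toList_append, String.toList_append, tl_neg1, String.toList_append, hstem1,
          show "y".toList = ['y'] from rfl, List.dropLast_concat, ← hp, ← hq]
        simp
  · rintro ⟨w, hw, hc⟩
    rw [mem_candsOf] at hc
    rcases hc with rfl | ⟨he, rfl⟩ | ⟨hy, rfl⟩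
    · have hes : PySem.Str.endswith (w ++ s) s = true := by
        rw [endsw_iff, String.toList_append]
        exact List.suffix_append _ _
      refine ⟨hes, Or.inl (Or.inl ?_)⟩
      have hst : (PySem.Str.slice (w ++ s) none (some (-(PySem.Str.len s)))).toList = w.toList := by
        rw [tl_negLen _ s hs, String.toList_append]
        have hl : (w.toList ++ s.toList).length - s.toList.length = w.toList.length := by simp
        rw [hl, List.take_left]
      rwa [String.toList_inj.mp hst]
    · obtain ⟨p, hp⟩ := (endsw_iff w "e").mp he
      rw [show "e".toList = ['e'] from rfl] at hp
      have hd : (PySem.Str.slice w none (some (-1))).toList = p := by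
        rw [tl_neg1, ← hp, List.dropLast_concat]
      have hes : PySem.Str.endswith (PySem.Str.slice w none (some (-1)) ++ s) s = true := by
        rw [endsw_iff, String.toList_append]
        exact List.suffix_append _ _
      refine ⟨hes, Or.inl (Or.inr ?_)⟩
      have hst : (PySem.Str.slice (PySem.Str.slice w none (some (-1)) ++ s) none
          (some (-(PySem.Str.len s)))).toList = p := by
        rw [tl_negLen _ s hs, String.toList_append, hd]
        have hl : (p ++ s.toList).length - s.toList.length = p.length := by simp
        rw [hl, List.take_left]
      have hw' : PySem.Str.slice (PySem.Str.slice w none (some (-1)) ++ s) none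
          (some (-(PySem.Str.len s))) ++ "e" = w := by
        apply String.toList_inj.mp
        rw [String.toList_append, hst, show "e".toList = ['e'] from rfl, hp]
      rwa [hw']
    · obtain ⟨p, hp⟩ := (endsw_iff w "y").mp hy
      rw [show "y".toList = ['y'] from rfl] at hp
      have hd : (PySem.Str.slice w none (some (-1))).toList = p := by
        rw [tl_neg1, ← hp, List.dropLast_concat]
      have hxl : (PySem.Str.slice w none (some (-1)) ++ "i" ++ s).toList
          = (p ++ ['i']) ++ s.toList := by
        rw [String.toList_append, String.toList_append, hd, show "i".toList = ['i'] from rfl]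
      have hes : PySem.Str.endswith (PySem.Str.slice w none (some (-1)) ++ "i" ++ s) s = true := by
        rw [endsw_iff, hxl]
        exact List.suffix_append _ _
      refine ⟨hes, Or.inr ?_⟩
      have hst : (PySem.Str.slice (PySem.Str.slice w none (some (-1)) ++ "i" ++ s) none
          (some (-(PySem.Str.len s)))).toList = p ++ ['i'] := by
        rw [tl_negLen _ s hs, hxl]
        have hl : ((p ++ ['i']) ++ s.toList).length - s.toList.length = (p ++ ['i']).length := by
          simp only [List.length_append, List.length_cons, List.length_nil]
          omega
        rw [hl, List.take_left]
      have hst1 : (PySem.Str.slice (PySem.Str.slice w none (some (-1)) ++ "i" ++ s) none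
          (some (-(PySem.Str.len s) - 1))).toList = p := by
        rw [tl_negLenSub1, hxl]
        have hl : ((p ++ ['i']) ++ s.toList).length - (s.toList.length + 1) = p.length := by
          simp only [List.length_append, List.length_cons, List.length_nil]
          omega
        rw [hl, List.append_assoc, List.take_left]
      constructor
      · rw [endsw_iff, hst, show "i".toList = ['i'] from rfl]
        exact List.suffix_append _ _
      · have hw' : PySem.Str.slice (PySem.Str.slice w none (some (-1)) ++ "i" ++ s) none
            (some (-(PySem.Str.len s) - 1)) ++ "y" = w := by
          apply String.toList_inj.mp
          rw [String.toList_append, hst1, show "y".toList = ['y'] from rfl, hp]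
        rwa [hw']

theorem notcontains_congr {l1 l2 : List String} (x : String) (h : x ∈ l1 ↔ x ∈ l2) :
    (!l1.contains x) = (!l2.contains x) := by
  by_cases hm : x ∈ l1
  · rw [List.contains_iff_mem.mpr hm, List.contains_iff_mem.mpr (h.mp hm)]
  · have hm2 : x ∉ l2 := fun c => hm (h.mpr c)
    have e1 : l1.contains x = false := by
      cases hc : l1.contains x
      · rfl
      · exact absurd (List.contains_iff_mem.mp hc) hm
    have e2 : l2.contains x = false := by
      cases hc : l2.contains x
      · rfl
      · exact absurd (List.contains_iff_mem.mp hc) hm2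
    rw [e1, e2]

theorem main_eq (words : List String) : wordset words = wordset_alt words := by
  simp only [wordset, wordset_alt, PySem.Set.diff]
  refine List.filter_congr ?_
  intro x hx
  apply notcontains_congr
  rw [mem_badA, mem_badB]
  have hempty : x ∉ (PySem.Set.empty : PySem.Set String) := by simp [PySem.Set.empty]
  constructor
  · rintro (habs | ⟨hxg, s, hsS, hguard⟩)
    · exact absurd habs hempty
    · obtain ⟨w, hw, hc⟩ := (key_iff _ x s hxg (suffices_ne_nil s hsS)).mp hguard
      exact Or.inr ⟨w, hw, s, hsS, hc, List.contains_iff_mem.mpr hxg⟩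
  · rintro (habs | ⟨w, hw, s, hsS, hc, hcx⟩)
    · exact absurd habs hempty
    · have hxg : x ∈ PySem.Set.ofList words := List.contains_iff_mem.mp hcx
      exact Or.inr ⟨hxg, s, hsS, (key_iff _ x s hxg (suffices_ne_nil s hsS)).mpr ⟨w, hw, hc⟩⟩

-- ===== VERDICT (by name: the statement is the Claim_ definition above) =====
theorem wordset_spec : Claim_equal_wordset := by
  intro words _
  unfold Spec_wordset
  exact main_eq words
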